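-- pv_equiv track=rewrite | github.com/daniel-reich/ubiquitous-fiesta | 8NyNftbNXd6CZCDXf_14.py | get_coin_balances
-- ===== SOURCE A (Python) =====
-- def get_coin_balances(lst1, lst2):
--   x,y=3,3
--   for i,j in zip(lst1,lst2):
--     if i==j=="share":
--       x+=2
--       y+=2
--     elif i!=j:
--       if i=="share":
--         x-=1
--         y+=3
--       else:
--         x+=3
--         y-=1
--   return [x,y]
-- ===== SOURCE B (Python) =====
-- _TABLE = {
--     (True, True, True): (2, 2),
--     (True, False, False): (-1, 3),
--     (False, True, False): (3, -1),
--     (False, False, False): (3, -1),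
-- }
--
-- def get_coin_balances(lst1, lst2):
--     # Phase 1: histogram of pair categories (is i 'share', is j 'share', i == j).
--     counts = {}
--     for i, j in zip(lst1, lst2):
--         key = (i == "share", j == "share", i == j)
--         counts[key] = counts.get(key, 0) + 1
--     # Phase 2: apply the score table to the (at most 5 reachable) category counts.
--     x, y = 3, 3
--     for key, n in counts.items():
--         dx, dy = _TABLE.get(key, (0, 0))
--         x += dx * n
--         y += dy * n
--     return [x, y]
-- ===== Notes on version B (the rewrite author's own statement) =====
-- stated objective: alternative
-- what changed: Replaces A's per-element two-accumulator branchy loop by a table-driven algorithm: one pass builds a dict histogram of pair categories (i=='share', j=='share', i==j), then a constant score table is applied to the at most five category counts.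
import Mathlib
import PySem

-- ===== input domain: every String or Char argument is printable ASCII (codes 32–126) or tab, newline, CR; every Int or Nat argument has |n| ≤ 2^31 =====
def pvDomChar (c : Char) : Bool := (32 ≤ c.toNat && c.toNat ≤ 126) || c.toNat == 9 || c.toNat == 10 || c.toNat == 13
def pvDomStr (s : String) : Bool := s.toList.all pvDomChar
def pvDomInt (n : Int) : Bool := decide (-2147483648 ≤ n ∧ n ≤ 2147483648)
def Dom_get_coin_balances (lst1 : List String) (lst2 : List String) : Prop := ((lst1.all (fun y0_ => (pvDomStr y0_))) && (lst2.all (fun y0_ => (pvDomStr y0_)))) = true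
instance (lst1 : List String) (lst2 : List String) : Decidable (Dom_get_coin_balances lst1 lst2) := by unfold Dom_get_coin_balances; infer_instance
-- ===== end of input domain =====

-- B replaces A's per-element two-accumulator branchy loop by a table-driven algorithm:
-- a dict histogram of pair categories, then a constant score table applied to the
-- category counts (objective: alternative).

-- ===== PORT A =====
-- loop body of A (one iteration of 'for i,j in zip(lst1,lst2)' updating (x, y))
def pvStepA (s : Int × Int) (ij : String × String) : Int × Int :=
  let i := ij.1
  let j := ij.2
  if i = j ∧ i = "share" then (s.1 + 2, s.2 + 2)
  else if i ≠ j then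
    if i = "share" then (s.1 - 1, s.2 + 3)
    else (s.1 + 3, s.2 - 1)
  else s

def get_coin_balances (lst1 : List String) (lst2 : List String) : List Int :=
  let st := (lst1.zip lst2).foldl pvStepA (3, 3)
  [st.1, st.2]

-- ===== PORT B =====
-- the constant _TABLE of Source B
def pvTable : PySem.Dict (Bool × Bool × Bool) (Int × Int) :=
  PySem.Dict.ofList
    [((true, true, true), (2, 2)),
     ((true, false, false), (-1, 3)),
     ((false, true, false), (3, -1)),
     ((false, false, false), (3, -1))]

-- the category key of a pair: (i == "share", j == "share", i == j)
def pvKey (ij : String × String) : Bool × Bool × Bool :=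
  (ij.1 == "share", ij.2 == "share", ij.1 == ij.2)

-- port of B: build the category histogram, then apply the score table to the counts
def get_coin_balances_alt (lst1 : List String) (lst2 : List String) : List Int :=
  let counts :=
    (lst1.zip lst2).foldl
      (fun d p => let k := pvKey p; d.insert k (d.getD k 0 + 1))
      (PySem.Dict.empty : PySem.Dict (Bool × Bool × Bool) Int)
  let st :=
    counts.items.foldl
      (fun s kn =>
        let dv := pvTable.getD kn.1 (0, 0)
        (s.1 + dv.1 * kn.2, s.2 + dv.2 * kn.2))
      ((3 : Int), (3 : Int))
  [st.1, st.2]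

-- ===== PRECONDITION & SPEC =====
def Spec_get_coin_balances (lst1 : List String) (lst2 : List String) (out : List Int) : Prop := out = get_coin_balances_alt lst1 lst2
instance (lst1 : List String) (lst2 : List String) (out : List Int) : Decidable (Spec_get_coin_balances lst1 lst2 out) := by unfold Spec_get_coin_balances; infer_instance

-- ===== CLAIM (what is proved, stated in full; the proofs are below) =====
def Claim_equal_get_coin_balances : Prop := ∀ (lst1 : List String) (lst2 : List String), Dom_get_coin_balances lst1 lst2 → Spec_get_coin_balances lst1 lst2 (get_coin_balances lst1 lst2)

-- ===== LEMMAS AND PROOFS =====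

-- the per-pair score of B's table at a pair's category key
def pvW (p : String × String) : Int × Int := pvTable.getD (pvKey p) (0, 0)

-- the five reachable table lookups, evaluated
theorem pvT_ttt : pvTable.getD (true, true, true) (0, 0) = (2, 2) := by decide
theorem pvT_tff : pvTable.getD (true, false, false) (0, 0) = (-1, 3) := by decide
theorem pvT_ftf : pvTable.getD (false, true, false) (0, 0) = (3, -1) := by decide
theorem pvT_fff : pvTable.getD (false, false, false) (0, 0) = (3, -1) := by decide
theorem pvT_fft : pvTable.getD (false, false, true) (0, 0) = (0, 0) := by decide

-- A's branchy step adds exactly B's table score of the pair's category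
theorem pv_stepA_eq_table (s : Int × Int) (p : String × String) :
    pvStepA s p = (s.1 + (pvW p).1, s.2 + (pvW p).2) := by
  obtain ⟨i, j⟩ := p
  by_cases hs : i = "share"
  · subst hs
    by_cases hj : "share" = j
    · subst hj
      simp [pvStepA, pvW, pvKey, pvT_ttt]
    · have hb : ("share" == j) = false := beq_eq_false_iff_ne.mpr hj
      have hb2 : (j == "share") = false := beq_eq_false_iff_ne.mpr (fun h => hj h.symm)
      simp [pvStepA, pvW, pvKey, hj, hb, hb2, pvT_tff]
      omega
  · have hbs : (i == "share") = false := beq_eq_false_iff_ne.mpr hs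
    by_cases hij : i = j
    · subst hij
      simp [pvStepA, pvW, pvKey, hs, hbs, pvT_fft]
    · have hbij : (i == j) = false := beq_eq_false_iff_ne.mpr hij
      by_cases hjs : j = "share"
      · subst hjs
        simp [pvStepA, pvW, pvKey, hs, hbs, pvT_ftf]
        omega
      · have hbj : (j == "share") = false := beq_eq_false_iff_ne.mpr hjs
        simp [pvStepA, pvW, pvKey, hs, hbs, hbij, hij, hbj, pvT_fff]
        omega

-- A's fold is the start state shifted by the componentwise sum of the table scores
theorem pv_foldA (l : List (String × String)) (x y : Int) :
    l.foldl pvStepA (x, y)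
      = (x + (l.map (fun p => (pvW p).1)).sum, y + (l.map (fun p => (pvW p).2)).sum) := by
  induction l generalizing x y with
  | nil => simp
  | cons hd tl ih =>
    simp only [List.foldl_cons, pv_stepA_eq_table, ih, List.map_cons, List.sum_cons,
      Prod.mk.injEq]
    constructor <;> ring

-- B's second loop over the items list is the start state shifted by weighted count sums
theorem pv_foldB (its : List ((Bool × Bool × Bool) × Int)) (x y : Int) :
    its.foldl
        (fun s kn =>
          let dv := pvTable.getD kn.1 (0, 0)
          (s.1 + dv.1 * kn.2, s.2 + dv.2 * kn.2)) (x, y)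
      = (x + (its.map (fun kn => (pvTable.getD kn.1 (0, 0)).1 * kn.2)).sum,
         y + (its.map (fun kn => (pvTable.getD kn.1 (0, 0)).2 * kn.2)).sum) := by
  induction its generalizing x y with
  | nil => simp
  | cons hd tl ih =>
    simp only [List.foldl_cons, ih, List.map_cons, List.sum_cons, Prod.mk.injEq]
    constructor <;> ring

-- summing an indicator over a nodup list containing x picks out w x
theorem pv_sum_ite {K : Type} [BEq K] [LawfulBEq K] (w : K → Int) (D : List K) (x : K)
    (hnd : D.Nodup) (hx : x ∈ D) :
    (D.map (fun k => if k == x then w k else 0)).sum = w x := by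
  induction D with
  | nil => cases hx
  | cons d ds ih =>
    rcases List.mem_cons.mp hx with h | h
    · subst h
      have hnotin : x ∉ ds := (List.nodup_cons.mp hnd).1
      have hz : (ds.map (fun k => if k == x then w k else 0)).sum = 0 := by
        apply List.sum_eq_zero
        intro v hv
        rcases List.mem_map.mp hv with ⟨k, hk, rfl⟩
        have hne : (k == x) = false :=
          beq_eq_false_iff_ne.mpr (fun h => hnotin (h ▸ hk))
        simp [hne]
      simp [hz]
    · have hne : (d == x) = false := beq_eq_false_iff_ne.mpr
        (by rintro rfl; exact (List.nodup_cons.mp hnd).1 h)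
      simp [hne, ih (List.nodup_cons.mp hnd).2 h]

-- weighted count sum over a nodup superset equals the plain sum over the list
theorem pv_sum_counts {K : Type} [BEq K] [LawfulBEq K] (w : K → Int) (D ks : List K)
    (hnd : D.Nodup) (hsub : ∀ x ∈ ks, x ∈ D) :
    (D.map (fun k => w k * (ks.count k : Int))).sum = (ks.map w).sum := by
  induction ks with
  | nil => simp
  | cons a ks ih =>
    have ha : a ∈ D := hsub a (List.mem_cons_self ..)
    have hsub' : ∀ x ∈ ks, x ∈ D := fun x hx => hsub x (List.mem_cons_of_mem _ hx)
    have hsplit :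
        (D.map (fun k => w k * ((a :: ks).count k : Int))).sum
          = (D.map (fun k => w k * (ks.count k : Int))).sum
            + (D.map (fun k => if k == a then w k else 0)).sum := by
      rw [← List.sum_map_add]
      apply congrArg List.sum
      apply List.map_congr_left
      intro k _
      by_cases hk : (k == a) = true
      · have hh := eq_of_beq hk
        subst hh
        simp [List.count_cons_self]
        ring
      · have hkf : (k == a) = false := Bool.not_eq_true _ ▸ (by simpa using hk)
        simp [List.count_cons, hkf]
        exact Or.inl (fun h => hk (by simp [h]))
    rw [hsplit, ih hsub', pv_sum_ite w D a hnd ha]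
    simp [add_comm]

-- the two instances used below: summing a table-score component weighted by the
-- category counts over the distinct categories equals summing it over all pairs
theorem pv_sum_counts1 (ks : List (Bool × Bool × Bool)) :
    ((PySem.Set.ofList ks).map
        (fun k => (pvTable.getD k (0, 0)).1 * (ks.count k : Int))).sum
      = (ks.map (fun k => (pvTable.getD k (0, 0)).1)).sum :=
  pv_sum_counts (fun k => (pvTable.getD k (0, 0)).1) (PySem.Set.ofList ks) ks
    (PySem.Set.nodup_ofList ks)
    (fun x hx => by simpa [PySem.Set.mem_ofList] using hx)

theorem pv_sum_counts2 (ks : List (Bool × Bool × Bool)) :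
    ((PySem.Set.ofList ks).map
        (fun k => (pvTable.getD k (0, 0)).2 * (ks.count k : Int))).sum
      = (ks.map (fun k => (pvTable.getD k (0, 0)).2)).sum :=
  pv_sum_counts (fun k => (pvTable.getD k (0, 0)).2) (PySem.Set.ofList ks) ks
    (PySem.Set.nodup_ofList ks)
    (fun x hx => by simpa [PySem.Set.mem_ofList] using hx)

-- ===== VERDICT (by name: the statement is the Claim_ definition above) =====
theorem get_coin_balances_spec : Claim_equal_get_coin_balances := by
  intro lst1 lst2 _
  unfold Spec_get_coin_balances
  show get_coin_balances lst1 lst2 = get_coin_balances_alt lst1 lst2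
  have hc :
      (lst1.zip lst2).foldl
          (fun d p => d.insert (pvKey p) (d.getD (pvKey p) 0 + 1))
          (PySem.Dict.empty : PySem.Dict (Bool × Bool × Bool) Int)
        = ((lst1.zip lst2).map pvKey).foldl
            (fun d k => d.insert k (d.getD k 0 + 1)) PySem.Dict.empty := by
    rw [List.foldl_map]
  simp only [get_coin_balances, get_coin_balances_alt]
  rw [hc, PySem.Dict.foldl_insert_getD_add_one_eq_counter, PySem.Dict.items_counter,
    pv_foldA, pv_foldB]
  simp only [List.map_map, Function.comp_def]
  rw [pv_sum_counts1, pv_sum_counts2]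
  simp [List.map_map, pvW, Function.comp_def]
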